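-- pv_equiv track=rewrite | github.com/kk1355315/eai | tools/export_foodkeeper_zh.py | translate_column_name
-- ===== SOURCE A (Python) =====
-- BASE_COLUMN_NAME_ZH = {
--     "ID": "编号",
--     "Category_ID": "分类编号",
--     "Product_ID": "食品编号",
--     "Name": "名称",
--     "Name_subtitle": "名称副标题",
--     "Keywords": "关键词",
--     "Category_Name": "分类名称",
--     "Subcategory_Name": "子分类名称",
--     "Sheet": "工作表",
--     "Column": "字段",
--     "Description": "说明",
--     "Tips": "提示",
--     "Safe_Minimum_Temperature": "最低安全温度",
--     "Rest_Time": "静置时间",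
--     "Rest_Time_metric": "静置时间单位",
--     "Cooking_Method": "烹饪方式",
--     "Measure_from": "规格起始值",
--     "Measure_to": "规格结束值",
--     "Size_metric": "规格单位",
--     "Cooking_Temperature": "烹饪温度",
--     "Timing_from": "时间起始值",
--     "Timing_to": "时间结束值",
--     "Timing_metric": "时间单位",
--     "Timing_per": "计时基准",
--     "Data_Version_Number": "数据版本号",
--     "Current_Version": "当前版本",
--     "Modified_Date": "修改日期",
--     "FSIS_Approved_Flag": "FSIS批准标记",
--     "Approved_Date": "批准日期",
--     "Notes": "备注",
-- }
--
-- STORAGE_PREFIX_ZH = {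
--     "Refrigerate_After_Opening": "开封后冷藏",
--     "Refrigerate_After_Thawing": "解冻后冷藏",
--     "Pantry_After_Opening": "开封后常温",
--     "DOP_Refrigerate": "购买后冷藏",
--     "DOP_Pantry": "购买后常温",
--     "DOP_Freeze": "购买后冷冻",
--     "Refrigerate": "冷藏",
--     "Pantry": "常温",
--     "Freeze": "冷冻",
-- }
--
-- STORAGE_SUFFIX_ZH = {
--     "Min": "最短值",
--     "Max": "最长值",
--     "Metric": "单位",
--     "tips": "提示",
--     "Tips": "提示",
-- }
--
-- def translate_column_name(name: str) -> str:
--     if name in BASE_COLUMN_NAME_ZH: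
--         return BASE_COLUMN_NAME_ZH[name]
--
--     for prefix, prefix_zh in sorted(STORAGE_PREFIX_ZH.items(), key=lambda item: -len(item[0])):
--         for suffix, suffix_zh in STORAGE_SUFFIX_ZH.items():
--             if name == f"{prefix}_{suffix}":
--                 return f"{prefix_zh}_{suffix_zh}"
--
--     return name
-- ===== SOURCE B (Python) =====
-- _TRANSLATIONS = {
--     "ID": "编号",
--     "Category_ID": "分类编号",
--     "Product_ID": "食品编号",
--     "Name": "名称",
--     "Name_subtitle": "名称副标题",
--     "Keywords": "关键词",
--     "Category_Name": "分类名称",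
--     "Subcategory_Name": "子分类名称",
--     "Sheet": "工作表",
--     "Column": "字段",
--     "Description": "说明",
--     "Tips": "提示",
--     "Safe_Minimum_Temperature": "最低安全温度",
--     "Rest_Time": "静置时间",
--     "Rest_Time_metric": "静置时间单位",
--     "Cooking_Method": "烹饪方式",
--     "Measure_from": "规格起始值",
--     "Measure_to": "规格结束值",
--     "Size_metric": "规格单位",
--     "Cooking_Temperature": "烹饪温度",
--     "Timing_from": "时间起始值",
--     "Timing_to": "时间结束值",
--     "Timing_metric": "时间单位",
--     "Timing_per": "计时基准",
--     "Data_Version_Number": "数据版本号",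
--     "Current_Version": "当前版本",
--     "Modified_Date": "修改日期",
--     "FSIS_Approved_Flag": "FSIS批准标记",
--     "Approved_Date": "批准日期",
--     "Notes": "备注",
--     "Refrigerate_After_Opening_Min": "开封后冷藏_最短值",
--     "Refrigerate_After_Opening_Max": "开封后冷藏_最长值",
--     "Refrigerate_After_Opening_Metric": "开封后冷藏_单位",
--     "Refrigerate_After_Opening_tips": "开封后冷藏_提示",
--     "Refrigerate_After_Opening_Tips": "开封后冷藏_提示",
--     "Refrigerate_After_Thawing_Min": "解冻后冷藏_最短值",
--     "Refrigerate_After_Thawing_Max": "解冻后冷藏_最长值",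
--     "Refrigerate_After_Thawing_Metric": "解冻后冷藏_单位",
--     "Refrigerate_After_Thawing_tips": "解冻后冷藏_提示",
--     "Refrigerate_After_Thawing_Tips": "解冻后冷藏_提示",
--     "Pantry_After_Opening_Min": "开封后常温_最短值",
--     "Pantry_After_Opening_Max": "开封后常温_最长值",
--     "Pantry_After_Opening_Metric": "开封后常温_单位",
--     "Pantry_After_Opening_tips": "开封后常温_提示",
--     "Pantry_After_Opening_Tips": "开封后常温_提示",
--     "DOP_Refrigerate_Min": "购买后冷藏_最短值",
--     "DOP_Refrigerate_Max": "购买后冷藏_最长值",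
--     "DOP_Refrigerate_Metric": "购买后冷藏_单位",
--     "DOP_Refrigerate_tips": "购买后冷藏_提示",
--     "DOP_Refrigerate_Tips": "购买后冷藏_提示",
--     "DOP_Pantry_Min": "购买后常温_最短值",
--     "DOP_Pantry_Max": "购买后常温_最长值",
--     "DOP_Pantry_Metric": "购买后常温_单位",
--     "DOP_Pantry_tips": "购买后常温_提示",
--     "DOP_Pantry_Tips": "购买后常温_提示",
--     "DOP_Freeze_Min": "购买后冷冻_最短值",
--     "DOP_Freeze_Max": "购买后冷冻_最长值",
--     "DOP_Freeze_Metric": "购买后冷冻_单位",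
--     "DOP_Freeze_tips": "购买后冷冻_提示",
--     "DOP_Freeze_Tips": "购买后冷冻_提示",
--     "Refrigerate_Min": "冷藏_最短值",
--     "Refrigerate_Max": "冷藏_最长值",
--     "Refrigerate_Metric": "冷藏_单位",
--     "Refrigerate_tips": "冷藏_提示",
--     "Refrigerate_Tips": "冷藏_提示",
--     "Pantry_Min": "常温_最短值",
--     "Pantry_Max": "常温_最长值",
--     "Pantry_Metric": "常温_单位",
--     "Pantry_tips": "常温_提示",
--     "Pantry_Tips": "常温_提示",
--     "Freeze_Min": "冷冻_最短值",
--     "Freeze_Max": "冷冻_最长值",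
--     "Freeze_Metric": "冷冻_单位",
--     "Freeze_tips": "冷冻_提示",
--     "Freeze_Tips": "冷冻_提示",
-- }
--
--
-- def translate_column_name(name: str) -> str:
--     return _TRANSLATIONS.get(name, name)
-- ===== Notes on version B (the rewrite author's own statement) =====
-- stated objective: idiomatic
-- what changed: A scans all 9 length-sorted storage prefixes times 5 suffixes at every call, rebuilding and comparing an f-string for each of the 45 pairs; B replaces the whole search by one flat precomputed 75-entry translation table (the base names plus every prefix_suffix composition, which are collision-free) and a single dict.get with the name itself as default.
import Mathlib
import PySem

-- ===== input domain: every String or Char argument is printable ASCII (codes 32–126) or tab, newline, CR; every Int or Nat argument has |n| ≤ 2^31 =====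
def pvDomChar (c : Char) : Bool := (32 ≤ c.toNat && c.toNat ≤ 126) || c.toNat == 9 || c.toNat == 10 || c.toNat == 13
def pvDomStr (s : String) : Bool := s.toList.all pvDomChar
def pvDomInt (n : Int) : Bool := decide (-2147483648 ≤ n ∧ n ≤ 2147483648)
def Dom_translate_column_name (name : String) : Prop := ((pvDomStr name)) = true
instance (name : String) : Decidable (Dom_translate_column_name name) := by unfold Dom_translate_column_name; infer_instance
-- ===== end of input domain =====

-- B replaces A's per-call length-sorted nested prefix×suffix scan by one precomputed
-- flat 75-entry translation table and a single dict lookup with the name as default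
-- (objective: idiomatic).

-- ===== PORT A =====
-- A's module constants (the three dict literals of Source A)
def pvBASE : PySem.Dict String String := PySem.Dict.ofList [
  ("ID", "编号"),
  ("Category_ID", "分类编号"),
  ("Product_ID", "食品编号"),
  ("Name", "名称"),
  ("Name_subtitle", "名称副标题"),
  ("Keywords", "关键词"),
  ("Category_Name", "分类名称"),
  ("Subcategory_Name", "子分类名称"),
  ("Sheet", "工作表"),
  ("Column", "字段"),
  ("Description", "说明"),
  ("Tips", "提示"),
  ("Safe_Minimum_Temperature", "最低安全温度"),
  ("Rest_Time", "静置时间"),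
  ("Rest_Time_metric", "静置时间单位"),
  ("Cooking_Method", "烹饪方式"),
  ("Measure_from", "规格起始值"),
  ("Measure_to", "规格结束值"),
  ("Size_metric", "规格单位"),
  ("Cooking_Temperature", "烹饪温度"),
  ("Timing_from", "时间起始值"),
  ("Timing_to", "时间结束值"),
  ("Timing_metric", "时间单位"),
  ("Timing_per", "计时基准"),
  ("Data_Version_Number", "数据版本号"),
  ("Current_Version", "当前版本"),
  ("Modified_Date", "修改日期"),
  ("FSIS_Approved_Flag", "FSIS批准标记"),
  ("Approved_Date", "批准日期"),
  ("Notes", "备注")]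

def pvPREF : PySem.Dict String String := PySem.Dict.ofList [
  ("Refrigerate_After_Opening", "开封后冷藏"),
  ("Refrigerate_After_Thawing", "解冻后冷藏"),
  ("Pantry_After_Opening", "开封后常温"),
  ("DOP_Refrigerate", "购买后冷藏"),
  ("DOP_Pantry", "购买后常温"),
  ("DOP_Freeze", "购买后冷冻"),
  ("Refrigerate", "冷藏"),
  ("Pantry", "常温"),
  ("Freeze", "冷冻")]

def pvSUF : PySem.Dict String String := PySem.Dict.ofList [
  ("Min", "最短值"),
  ("Max", "最长值"),
  ("Metric", "单位"),
  ("tips", "提示"),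
  ("Tips", "提示")]

-- inner loop: `for suffix, suffix_zh in STORAGE_SUFFIX_ZH.items(): if name == f"{prefix}_{suffix}": return …`
def pvInnerA (name p pz : String) : List (String × String) → Option String
  | [] => none
  | (s, sz) :: rest => if name = p ++ "_" ++ s then some (pz ++ "_" ++ sz) else pvInnerA name p pz rest

-- outer loop over the length-sorted prefix items, with the early return threaded as Option
def pvOuterA (name : String) : List (String × String) → Option String
  | [] => none
  | (p, pz) :: rest =>
    match pvInnerA name p pz pvSUF.items with
    | some r => some r
    | none => pvOuterA name rest

def translate_column_name (name : String) : String :=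
  match pvBASE.get? name with        -- `if name in BASE_COLUMN_NAME_ZH: return BASE_COLUMN_NAME_ZH[name]`
  | some v => v
  | none =>
    match pvOuterA name (PySem.List.sorted pvPREF.items (fun item => -(PySem.Str.len item.1)) false) with
    | some r => r
    | none => name

-- ===== PORT B =====
-- Source B's `_TRANSLATIONS` module constant: the flat precomputed table, written out as in Source B
def pvTABLE : PySem.Dict String String := PySem.Dict.ofList [
  ("ID", "编号"),
  ("Category_ID", "分类编号"),
  ("Product_ID", "食品编号"),
  ("Name", "名称"),
  ("Name_subtitle", "名称副标题"),
  ("Keywords", "关键词"),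
  ("Category_Name", "分类名称"),
  ("Subcategory_Name", "子分类名称"),
  ("Sheet", "工作表"),
  ("Column", "字段"),
  ("Description", "说明"),
  ("Tips", "提示"),
  ("Safe_Minimum_Temperature", "最低安全温度"),
  ("Rest_Time", "静置时间"),
  ("Rest_Time_metric", "静置时间单位"),
  ("Cooking_Method", "烹饪方式"),
  ("Measure_from", "规格起始值"),
  ("Measure_to", "规格结束值"),
  ("Size_metric", "规格单位"),
  ("Cooking_Temperature", "烹饪温度"),
  ("Timing_from", "时间起始值"),
  ("Timing_to", "时间结束值"),
  ("Timing_metric", "时间单位"),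
  ("Timing_per", "计时基准"),
  ("Data_Version_Number", "数据版本号"),
  ("Current_Version", "当前版本"),
  ("Modified_Date", "修改日期"),
  ("FSIS_Approved_Flag", "FSIS批准标记"),
  ("Approved_Date", "批准日期"),
  ("Notes", "备注"),
  ("Refrigerate_After_Opening_Min", "开封后冷藏_最短值"),
  ("Refrigerate_After_Opening_Max", "开封后冷藏_最长值"),
  ("Refrigerate_After_Opening_Metric", "开封后冷藏_单位"),
  ("Refrigerate_After_Opening_tips", "开封后冷藏_提示"),
  ("Refrigerate_After_Opening_Tips", "开封后冷藏_提示"),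
  ("Refrigerate_After_Thawing_Min", "解冻后冷藏_最短值"),
  ("Refrigerate_After_Thawing_Max", "解冻后冷藏_最长值"),
  ("Refrigerate_After_Thawing_Metric", "解冻后冷藏_单位"),
  ("Refrigerate_After_Thawing_tips", "解冻后冷藏_提示"),
  ("Refrigerate_After_Thawing_Tips", "解冻后冷藏_提示"),
  ("Pantry_After_Opening_Min", "开封后常温_最短值"),
  ("Pantry_After_Opening_Max", "开封后常温_最长值"),
  ("Pantry_After_Opening_Metric", "开封后常温_单位"),
  ("Pantry_After_Opening_tips", "开封后常温_提示"),
  ("Pantry_After_Opening_Tips", "开封后常温_提示"),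
  ("DOP_Refrigerate_Min", "购买后冷藏_最短值"),
  ("DOP_Refrigerate_Max", "购买后冷藏_最长值"),
  ("DOP_Refrigerate_Metric", "购买后冷藏_单位"),
  ("DOP_Refrigerate_tips", "购买后冷藏_提示"),
  ("DOP_Refrigerate_Tips", "购买后冷藏_提示"),
  ("DOP_Pantry_Min", "购买后常温_最短值"),
  ("DOP_Pantry_Max", "购买后常温_最长值"),
  ("DOP_Pantry_Metric", "购买后常温_单位"),
  ("DOP_Pantry_tips", "购买后常温_提示"),
  ("DOP_Pantry_Tips", "购买后常温_提示"),
  ("DOP_Freeze_Min", "购买后冷冻_最短值"),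
  ("DOP_Freeze_Max", "购买后冷冻_最长值"),
  ("DOP_Freeze_Metric", "购买后冷冻_单位"),
  ("DOP_Freeze_tips", "购买后冷冻_提示"),
  ("DOP_Freeze_Tips", "购买后冷冻_提示"),
  ("Refrigerate_Min", "冷藏_最短值"),
  ("Refrigerate_Max", "冷藏_最长值"),
  ("Refrigerate_Metric", "冷藏_单位"),
  ("Refrigerate_tips", "冷藏_提示"),
  ("Refrigerate_Tips", "冷藏_提示"),
  ("Pantry_Min", "常温_最短值"),
  ("Pantry_Max", "常温_最长值"),
  ("Pantry_Metric", "常温_单位"),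
  ("Pantry_tips", "常温_提示"),
  ("Pantry_Tips", "常温_提示"),
  ("Freeze_Min", "冷冻_最短值"),
  ("Freeze_Max", "冷冻_最长值"),
  ("Freeze_Metric", "冷冻_单位"),
  ("Freeze_tips", "冷冻_提示"),
  ("Freeze_Tips", "冷冻_提示")]

-- `return _TRANSLATIONS.get(name, name)`
def translate_column_name_alt (name : String) : String := pvTABLE.getD name name

-- ===== PRECONDITION & SPEC =====
def Spec_translate_column_name (name : String) (out : String) : Prop := out = translate_column_name_alt name
instance (name : String) (out : String) : Decidable (Spec_translate_column_name name out) := by unfold Spec_translate_column_name; infer_instance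

-- ===== CLAIM (what is proved, stated in full; the proofs are below) =====
def Claim_equal_translate_column_name : Prop := ∀ (name : String), Dom_translate_column_name name → Spec_translate_column_name name (translate_column_name name)

-- ===== LEMMAS AND PROOFS =====

-- A's inner loop finds a matching suffix pair
theorem pvInnerA_some {name p pz r} {sufs : List (String × String)}
    (h : pvInnerA name p pz sufs = some r) :
    ∃ s sz, (s, sz) ∈ sufs ∧ name = p ++ "_" ++ s ∧ r = pz ++ "_" ++ sz := by
  induction sufs with
  | nil => simp [pvInnerA] at h
  | cons hd tl ih =>
    obtain ⟨s, sz⟩ := hd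
    simp only [pvInnerA] at h
    by_cases hm : name = p ++ "_" ++ s
    · rw [if_pos hm] at h
      exact ⟨s, sz, by simp, hm, (Option.some.inj h).symm⟩
    · simp [hm] at h
      obtain ⟨s', sz', hmem, hn, hr⟩ := ih h
      exact ⟨s', sz', by simp [hmem], hn, hr⟩

theorem pvInnerA_none {name p pz} {sufs : List (String × String)}
    (h : pvInnerA name p pz sufs = none) :
    ∀ s sz, (s, sz) ∈ sufs → name ≠ p ++ "_" ++ s := by
  induction sufs with
  | nil => simp
  | cons hd tl ih =>
    obtain ⟨s, sz⟩ := hd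
    simp only [pvInnerA] at h
    by_cases hm : name = p ++ "_" ++ s
    · simp [hm] at h
    · simp [hm] at h
      intro s' sz' hmem
      rcases List.mem_cons.mp hmem with heq | hmem'
      · cases heq; exact hm
      · exact ih h s' sz' hmem'

theorem pvOuterA_some {name r} {prefs : List (String × String)}
    (h : pvOuterA name prefs = some r) :
    ∃ p pz s sz, (p, pz) ∈ prefs ∧ (s, sz) ∈ pvSUF.items ∧
      name = p ++ "_" ++ s ∧ r = pz ++ "_" ++ sz := by
  induction prefs with
  | nil => simp [pvOuterA] at h
  | cons hd tl ih =>
    obtain ⟨p, pz⟩ := hd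
    simp only [pvOuterA] at h
    cases hi : pvInnerA name p pz pvSUF.items with
    | some r' =>
      rw [hi] at h
      obtain rfl : r' = r := by simpa using h
      obtain ⟨s, sz, hmem, hn, hr⟩ := pvInnerA_some hi
      exact ⟨p, pz, s, sz, by simp, hmem, hn, hr⟩
    | none =>
      rw [hi] at h
      obtain ⟨p', pz', s', sz', hp, hs, hn, hr⟩ := ih h
      exact ⟨p', pz', s', sz', by simp [hp], hs, hn, hr⟩

theorem pvOuterA_none {name} {prefs : List (String × String)}
    (h : pvOuterA name prefs = none) :
    ∀ p pz s sz, (p, pz) ∈ prefs → (s, sz) ∈ pvSUF.items → name ≠ p ++ "_" ++ s := by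
  induction prefs with
  | nil => simp
  | cons hd tl ih =>
    obtain ⟨p, pz⟩ := hd
    simp only [pvOuterA] at h
    cases hi : pvInnerA name p pz pvSUF.items with
    | some r' => rw [hi] at h; simp at h
    | none =>
      rw [hi] at h
      intro p' pz' s' sz' hp hs
      rcases List.mem_cons.mp hp with heq | hp'
      · cases heq; exact pvInnerA_none hi s' sz' hs
      · exact ih h p' pz' s' sz' hp' hs

set_option maxRecDepth 40000 in
-- the table agrees with the base dict on the 30 base keys
theorem pvTableBase : ∀ kv ∈ pvBASE.items, pvTABLE.get? kv.1 = some kv.2 := by decide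

set_option maxRecDepth 40000 in
-- the table carries the paired translation for each of the 45 composed keys
theorem pvTableComp : ∀ ps ∈ pvPREF.items, ∀ ss ∈ pvSUF.items,
    pvTABLE.get? (ps.1 ++ "_" ++ ss.1) = some (ps.2 ++ "_" ++ ss.2) := by decide

set_option maxRecDepth 40000 in
-- every table key is a base key or a composed key
theorem pvTableKeys : ∀ kv ∈ pvTABLE.items,
    pvBASE.get? kv.1 ≠ none ∨
    ∃ ps ∈ pvPREF.items, ∃ ss ∈ pvSUF.items, kv.1 = ps.1 ++ "_" ++ ss.1 := by decide

-- ===== VERDICT (by name: the statement is the Claim_ definition above) =====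
theorem translate_column_name_spec : Claim_equal_translate_column_name := by
  intro name _
  unfold Spec_translate_column_name translate_column_name translate_column_name_alt
  rw [PySem.Dict.getD_eq_get?_getD]
  cases hb : pvBASE.get? name with
  | some v =>
    have := pvTableBase (name, v) (PySem.Dict.mem_items_of_get?_eq_some pvBASE hb)
    simp [this]
  | none =>
    cases ho : pvOuterA name (PySem.List.sorted pvPREF.items (fun item => -(PySem.Str.len item.1)) false) with
    | some r =>
      obtain ⟨p, pz, s, sz, hp, hs, hn, hr⟩ := pvOuterA_some ho
      have hp' : (p, pz) ∈ pvPREF.items := (PySem.List.mem_sorted _ _ _ _).mp hp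
      have := pvTableComp (p, pz) hp' (s, sz) hs
      simp only at this
      rw [hn, this]
      simp [hr]
    | none =>
      cases ht : pvTABLE.get? name with
      | none => rfl
      | some v =>
        exfalso
        rcases pvTableKeys (name, v) (PySem.Dict.mem_items_of_get?_eq_some pvTABLE ht) with hb' | ⟨ps, hps, ss, hss, heq⟩
        · exact hb' hb
        · have hps' : ps ∈ PySem.List.sorted pvPREF.items (fun item => -(PySem.Str.len item.1)) false :=
            (PySem.List.mem_sorted _ _ _ _).mpr hps
          exact pvOuterA_none ho ps.1 ps.2 ss.1 ss.2 (by simpa using hps') (by simpa using hss) heq
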